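-- pv_equiv track=rewrite | github.com/liuhaotian2024-prog/ystar-bridge-labs | ystar.bak.20260415_again/kernel/merge.py | _merge_whitelist_paths
-- ===== SOURCE A (Python) =====
-- from typing import Dict, List, Optional, Set
--
-- def _is_path_within(child: str, parent: str) -> bool:
--     """Check if child path is within parent path (prefix match with /)."""
--     cn = child.rstrip("/") + "/"
--     pn = parent.rstrip("/") + "/"
--     return cn.startswith(pn)
--
-- def _merge_whitelist_paths(
--     session_paths: List[str],
--     deny_paths: List[str],
--     relax_paths: List[str],
-- ) -> List[str]:
--     """
--     Whitelist path merge.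
--
--     - If session has no whitelist, result is empty (no restriction).
--     - deny NARROWS: only keeps deny paths that are within session paths.
--     - relax WIDENS: adds paths back, but only if within session boundary.
--
--     If deny is empty, session is used as-is.
--     """
--     if not session_paths:
--         return []
--
--     # Step 1: Apply deny narrowing
--     if deny_paths:
--         # Only keep deny paths that are within at least one session path
--         after_deny = [
--             p for p in deny_paths
--             if any(_is_path_within(p, sp) for sp in session_paths)
--         ]
--         # If deny produced an empty list (all invalid), fall back to session
--         if not after_deny:
--             after_deny = list(session_paths)
--     else:
--         after_deny = list(session_paths)
--
--     # Step 2: Apply relax widening (within session boundary)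
--     if relax_paths:
--         result_set = set(after_deny)
--         for rp in relax_paths:
--             # Relax path must be within at least one session path
--             if any(_is_path_within(rp, sp) for sp in session_paths):
--                 result_set.add(rp)
--         return list(dict.fromkeys(after_deny + [
--             rp for rp in relax_paths
--             if rp in result_set and rp not in after_deny
--         ]))
--
--     return after_deny
-- ===== SOURCE B (Python) =====
-- from typing import List
--
--
-- def _merge_whitelist_paths(
--     session_paths: List[str],
--     deny_paths: List[str],
--     relax_paths: List[str],
-- ) -> List[str]:
--     if not session_paths:
--         return []
--     # Hash-set of normalized session prefixes: containment is now tested by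
--     # enumerating the candidate's own '/'-ancestors, no scan over session_paths.
--     prefixes = {sp.rstrip("/") + "/" for sp in session_paths}
--
--     def within_any(path: str) -> bool:
--         cn = path.rstrip("/") + "/"
--         return any(ch == "/" and cn[: i + 1] in prefixes for i, ch in enumerate(cn))
--
--     after_deny = [p for p in deny_paths if within_any(p)] or list(session_paths)
--     if not relax_paths:
--         return after_deny
--     seen = set()
--     out = []
--     for p in after_deny + [rp for rp in relax_paths if within_any(rp)]:
--         if p not in seen:
--             seen.add(p)
--             out.append(p)
--     return out
-- ===== Notes on version B (the rewrite author's own statement) =====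
-- stated objective: faster
-- what changed: Replaces A's inner any-scan over session_paths per deny/relax candidate by a hash set of normalized session prefixes queried at each '/'-ancestor of the candidate, and replaces A's conditionally-built result_set plus membership re-filter plus dict.fromkeys dedup by a single seen/out dedup pass.
import Mathlib
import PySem

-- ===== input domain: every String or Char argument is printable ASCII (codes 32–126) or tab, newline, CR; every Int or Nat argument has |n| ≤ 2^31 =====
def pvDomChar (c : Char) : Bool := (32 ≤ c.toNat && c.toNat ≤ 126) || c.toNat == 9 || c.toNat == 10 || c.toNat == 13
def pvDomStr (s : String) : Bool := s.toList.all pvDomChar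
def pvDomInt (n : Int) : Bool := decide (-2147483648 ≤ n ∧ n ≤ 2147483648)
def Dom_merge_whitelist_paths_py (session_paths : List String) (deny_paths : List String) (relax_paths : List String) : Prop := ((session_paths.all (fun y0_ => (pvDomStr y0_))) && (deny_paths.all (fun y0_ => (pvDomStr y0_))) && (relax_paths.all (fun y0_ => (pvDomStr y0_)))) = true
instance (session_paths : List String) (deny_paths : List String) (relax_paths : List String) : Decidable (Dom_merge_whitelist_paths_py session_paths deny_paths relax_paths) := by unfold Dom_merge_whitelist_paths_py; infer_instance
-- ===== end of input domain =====

-- B replaces A's per-candidate scan over session_paths by a hash-set of normalized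
-- session prefixes queried at each '/'-ancestor of the candidate, and builds the
-- deduplicated result in one seen/out pass (objective: faster, constant-factor to
-- asymptotic in the number of session paths).


-- s.rstrip("/") + "/", ported by hand on List Char (PySem has no rstrip-with-chars):
-- drop the maximal run of trailing '/' then append one '/'. Exact for this one-char strip set.
def pvNorm (s : String) : List Char :=
  (s.toList.reverse.dropWhile (· == '/')).reverse ++ ['/']

-- ===== PORT A =====
def is_path_within_py (child : String) (parent : String) : Bool :=
  PySem.Chars.startswith (pvNorm child) (pvNorm parent)

def merge_whitelist_paths_py (session_paths : List String) (deny_paths : List String) (relax_paths : List String) : List String :=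
  if session_paths = [] then []
  else
    let after_deny :=
      if deny_paths ≠ [] then
        let ad := deny_paths.filter (fun p => session_paths.any (fun sp => is_path_within_py p sp))
        if ad = [] then session_paths else ad
      else session_paths
    if relax_paths ≠ [] then
      let result_set : PySem.Set String :=
        relax_paths.foldl
          (fun s rp => if session_paths.any (fun sp => is_path_within_py rp sp) then PySem.Set.add s rp else s)
          (PySem.Set.ofList after_deny)
      PySem.List.dedup (after_deny ++
        relax_paths.filter (fun rp => PySem.Set.contains result_set rp && !(after_deny.contains rp)))
    else after_deny

-- ===== PORT B =====
-- containment test of Source B: candidate's '/'-ancestors looked up in the prefix set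
def pvWithinAny (prefixes : PySem.Set (List Char)) (path : String) : Bool :=
  let cn := pvNorm path
  (PySem.List.enumerate cn).any (fun p =>
    p.2 == '/' && PySem.Set.contains prefixes (PySem.List.slice cn none (some (p.1 + 1))))

def merge_whitelist_paths_py_alt (session_paths : List String) (deny_paths : List String) (relax_paths : List String) : List String :=
  if session_paths = [] then []
  else
    let prefixes : PySem.Set (List Char) := PySem.Set.ofList (session_paths.map pvNorm)
    let fd := deny_paths.filter (pvWithinAny prefixes)
    let after_deny := if fd = [] then session_paths else fd
    if relax_paths = [] then after_deny
    else
      -- Source B's seen/out loop: out coincides with seen, an ordered set built by add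
      (after_deny ++ relax_paths.filter (pvWithinAny prefixes)).foldl PySem.Set.add []

-- ===== PRECONDITION & SPEC =====
def Spec_merge_whitelist_paths_py (session_paths : List String) (deny_paths : List String) (relax_paths : List String) (out : List String) : Prop := out = merge_whitelist_paths_py_alt session_paths deny_paths relax_paths
instance (session_paths : List String) (deny_paths : List String) (relax_paths : List String) (out : List String) : Decidable (Spec_merge_whitelist_paths_py session_paths deny_paths relax_paths out) := by unfold Spec_merge_whitelist_paths_py; infer_instance

-- ===== CLAIM (what is proved, stated in full; the proofs are below) =====
def Claim_equal_merge_whitelist_paths_py : Prop := ∀ (session_paths : List String) (deny_paths : List String) (relax_paths : List String), Dom_merge_whitelist_paths_py session_paths deny_paths relax_paths → Spec_merge_whitelist_paths_py session_paths deny_paths relax_paths (merge_whitelist_paths_py session_paths deny_paths relax_paths)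

-- ===== LEMMAS AND PROOFS =====

-- the two containment tests agree
lemma pvWithinAny_eq (session : List String) (p : String) :
    pvWithinAny (PySem.Set.ofList (session.map pvNorm)) p
      = session.any (fun sp => is_path_within_py p sp) := by
  rw [Bool.eq_iff_iff]
  simp only [pvWithinAny, is_path_within_py, List.any_eq_true,
    PySem.Chars.startswith_iff, PySem.Set.contains_eq_listContains, List.contains_eq_mem,
    PySem.Set.mem_ofList, List.mem_map, Bool.and_eq_true, beq_iff_eq, decide_eq_true_eq]
  constructor
  · rintro ⟨q, hq, hsl, sp, hsp, hnorm⟩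
    obtain ⟨k, hk, rfl⟩ := (PySem.List.mem_enumerate_iff _ _ _).mp hq
    refine ⟨sp, hsp, ?_⟩
    rw [hnorm]
    have hc : ((0:Int) + (k:Int) + 1) = ((k + 1 : Nat) : Int) := by push_cast; ring
    simp only at hsl ⊢
    rw [hc, PySem.List.slice_to_natCast]
    exact List.take_prefix _ _
  · rintro ⟨sp, hsp, hpre⟩
    obtain ⟨t, ht⟩ : ∃ t, pvNorm sp = t ++ ['/'] := ⟨_, rfl⟩
    rw [ht] at hpre
    obtain ⟨rest, hrest⟩ := hpre
    have hsplit : pvNorm p = t ++ ('/' :: rest) := by rw [← hrest]; simp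
    have hk : t.length < (pvNorm p).length := by rw [hsplit]; simp
    refine ⟨((0:Int) + (t.length:Int), (pvNorm p)[t.length]),
      (PySem.List.mem_enumerate_iff _ _ _).mpr ⟨t.length, hk, rfl⟩, ?_, sp, hsp, ?_⟩
    · simp [hsplit]
    · have hc : ((0:Int) + (t.length:Int) + 1) = ((t.length + 1 : Nat) : Int) := by push_cast; ring
      simp only [hc, PySem.List.slice_to_natCast]
      rw [ht, ← hrest, List.take_left' (by simp : (t ++ ['/']).length = t.length + 1)]

-- membership in A's conditionally-built result_set
lemma mem_foldl_cond_add (xs : List String) (cond : String → Bool) (s : PySem.Set String) (y : String) :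
    y ∈ xs.foldl (fun s rp => if cond rp then PySem.Set.add s rp else s) s
      ↔ y ∈ s ∨ (y ∈ xs ∧ cond y) := by
  induction xs generalizing s with
  | nil => simp
  | cons x xs ih =>
    simp only [List.foldl_cons, ih, List.mem_cons]
    by_cases hc : cond x
    · simp only [hc, if_true, PySem.Set.mem_add]
      constructor
      · rintro ((h | rfl) | h)
        · tauto
        · exact Or.inr ⟨Or.inl rfl, hc⟩
        · tauto
      · rintro (h | ⟨(rfl | h), hy⟩) <;> tauto
    · simp only [hc, if_false, Bool.false_eq_true]
      constructor
      · rintro (h | h) <;> tauto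
      · rintro (h | ⟨(rfl | h), hy⟩)
        · tauto
        · exact absurd hy (by simp [hc])
        · tauto


-- adding elements already in s is a no-op, so the "not already in xs" filter can be dropped
lemma foldl_add_filter_skip (xs ys : List String) (p : String → Bool) (s : PySem.Set String)
    (hs : ∀ y ∈ xs, y ∈ s) :
    (ys.filter (fun y => p y && !xs.contains y)).foldl PySem.Set.add s
      = (ys.filter p).foldl PySem.Set.add s := by
  induction ys generalizing s with
  | nil => rfl
  | cons y ys ih =>
    by_cases hp : p y
    · by_cases hx : y ∈ xs
      · have hadd : PySem.Set.add s y = s := PySem.Set.add_of_mem (hs y hx)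
        have h1 : (p y && !xs.contains y) = false := by
          simp [hp, List.contains_eq_mem, hx]
        rw [List.filter_cons, List.filter_cons, h1, if_neg (by simp), if_pos hp,
          List.foldl_cons, hadd]
        exact ih s hs
      · have h1 : (p y && !xs.contains y) = true := by
          simp [hp, List.contains_eq_mem, hx]
        rw [List.filter_cons, List.filter_cons, h1, if_pos rfl, if_pos hp,
          List.foldl_cons, List.foldl_cons]
        exact ih (PySem.Set.add s y) (fun z hz => (PySem.Set.mem_add s y z).mpr (Or.inl (hs z hz)))
    · have h1 : (p y && !xs.contains y) = false := by simp [hp]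
      rw [List.filter_cons, List.filter_cons, h1, if_neg (by simp), if_neg (by simp [hp])]
      exact ih s hs

lemma merge_core (session deny relax : List String) (hs : session ≠ []) :
    merge_whitelist_paths_py session deny relax = merge_whitelist_paths_py_alt session deny relax := by
  have hwin : pvWithinAny (PySem.Set.ofList (session.map pvNorm))
      = fun rp => session.any (fun sp => is_path_within_py rp sp) := by
    funext p; exact pvWithinAny_eq session p
  unfold merge_whitelist_paths_py merge_whitelist_paths_py_alt
  simp only [if_neg hs, hwin]
  set cond : String → Bool := fun rp => session.any (fun sp => is_path_within_py rp sp) with hcond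
  have had : (if deny ≠ [] then
        (if deny.filter cond = [] then session else deny.filter cond)
      else session)
      = (if deny.filter cond = [] then session else deny.filter cond) := by
    by_cases hd : deny = [] <;> simp [hd]
  rw [had]
  set ad := if deny.filter cond = [] then session else deny.filter cond with had_def
  by_cases hr : relax = []
  · simp [hr]
  · simp only [hr, ne_eq, not_false_eq_true, if_true, if_false]
    rw [PySem.List.dedup_eq_ofList, PySem.Set.ofList_eq_foldl, PySem.Set.ofList_eq_foldl,
      List.foldl_append, List.foldl_append]
    have hfilter :
        relax.filter (fun rp =>
            PySem.Set.contains
              (relax.foldl (fun s rp => if cond rp then PySem.Set.add s rp else s)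
                (PySem.Set.ofList ad)) rp
            && !(ad.contains rp))
          = relax.filter (fun rp => cond rp && !(ad.contains rp)) := by
      apply List.filter_congr
      intro rp hrp
      by_cases hin : rp ∈ ad
      · simp [List.contains_eq_mem, hin]
      · have hmem : PySem.Set.contains
            (relax.foldl (fun s rp => if cond rp then PySem.Set.add s rp else s)
              (PySem.Set.ofList ad)) rp = cond rp := by
          rw [Bool.eq_iff_iff]
          simp only [PySem.Set.contains_eq_listContains, List.contains_eq_mem, decide_eq_true_eq,
            mem_foldl_cond_add, PySem.Set.mem_ofList]
          constructor
          · rintro (h | h)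
            · exact absurd h hin
            · exact h.2
          · exact fun h => Or.inr ⟨hrp, h⟩
        rw [hmem]
    rw [PySem.Set.ofList_eq_foldl] at hfilter
    rw [hfilter]
    exact foldl_add_filter_skip ad relax cond (List.foldl PySem.Set.add [] ad)
      (fun y hy => by
        rw [← PySem.Set.ofList_eq_foldl, PySem.Set.mem_ofList]; exact hy)

-- ===== VERDICT (by name: the statement is the Claim_ definition above) =====
theorem merge_whitelist_paths_py_spec : Claim_equal_merge_whitelist_paths_py := by
  intro session deny relax _
  unfold Spec_merge_whitelist_paths_py
  by_cases hs : session = []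
  · simp [merge_whitelist_paths_py, merge_whitelist_paths_py_alt, hs]
  · exact merge_core session deny relax hs
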